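-- pv_equiv track=rewrite | github.com/rahulsamant37/Daily-Task | Python/python_question_1139.py | solution
-- ===== SOURCE A (Python) =====
-- def solution(nums, k):
--     """
--     Finds the maximum sum of any subarray of nums that contains at most k distinct elements.
--
--     Args:
--         nums: A list of integers.
--         k: An integer representing the maximum number of distinct elements allowed in the subarray.
--
--     Returns:
--         The maximum sum of any subarray of nums that contains at most k distinct elements.
--     """
--
--     max_sum = 0
--     for i in range(len(nums)):
--         for j in range(i, len(nums)):
--             subarray = nums[i:j+1]
--             distinct_elements = len(set(subarray))
--             if distinct_elements <= k:
--                 current_sum = sum(subarray)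
--                 max_sum = max(max_sum, current_sum)
--     return max_sum
-- ===== SOURCE B (Python) =====
-- def solution(nums, k):
--     best = 0
--     n = len(nums)
--     for i in range(n):
--         seen = set()
--         s = 0
--         for x in nums[i:]:
--             seen.add(x)
--             s += x
--             if len(seen) <= k:
--                 best = max(best, s)
--     return best
-- ===== Notes on version B (the rewrite author's own statement) =====
-- stated objective: faster
-- what changed: Instead of materialising every subarray nums[i:j+1] and recomputing its set and sum from scratch, B extends each window one element at a time, maintaining the seen-set and running sum incrementally, removing the inner O(n) recomputation.
import Mathlib
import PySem

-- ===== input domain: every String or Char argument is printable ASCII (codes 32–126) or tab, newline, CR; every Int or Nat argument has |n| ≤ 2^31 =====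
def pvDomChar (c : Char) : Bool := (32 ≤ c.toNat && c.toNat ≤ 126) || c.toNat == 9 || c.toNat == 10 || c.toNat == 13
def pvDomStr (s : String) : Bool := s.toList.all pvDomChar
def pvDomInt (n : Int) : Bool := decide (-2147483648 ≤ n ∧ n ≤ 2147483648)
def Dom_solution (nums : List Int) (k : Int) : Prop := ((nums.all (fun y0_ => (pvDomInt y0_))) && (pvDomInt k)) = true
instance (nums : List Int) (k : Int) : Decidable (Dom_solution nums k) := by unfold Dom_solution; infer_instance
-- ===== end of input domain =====

-- B replaces A's per-subarray slice/set/sum recomputation by an incremental window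
-- extension (running set and running sum); objective: faster (measured by the check).

-- ===== PORT A =====
def solution (nums : List Int) (k : Int) : Int :=
  (PySem.List.pyRange 0 (nums.length : Int) 1).foldl (fun max_sum i =>
    (PySem.List.pyRange i (nums.length : Int) 1).foldl (fun max_sum j =>
      let subarray := PySem.List.slice nums (some i) (some (j + 1))
      let distinct := PySem.Set.len (PySem.Set.ofList subarray)
      if distinct ≤ k then max max_sum subarray.sum else max_sum) max_sum) 0

-- ===== PORT B =====
-- B's inner 'for x in nums[i:]' loop: structural recursion over the suffix,
-- carrying (best, seen, running sum).
def solutionAltInner (k : Int) : List Int → Int → PySem.Set Int → Int → Int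
  | [], best, _, _ => best
  | x :: rest, best, seen, s =>
      let seen' := PySem.Set.add seen x
      let s' := s + x
      solutionAltInner k rest (if PySem.Set.len seen' ≤ k then max best s' else best) seen' s'

def solution_alt (nums : List Int) (k : Int) : Int :=
  (PySem.List.pyRange 0 (nums.length : Int) 1).foldl (fun best i =>
    solutionAltInner k (PySem.List.slice nums (some i) none) best PySem.Set.empty 0) 0

-- ===== PRECONDITION & SPEC =====
def Spec_solution (nums : List Int) (k : Int) (out : Int) : Prop := out = solution_alt nums k
instance (nums : List Int) (k : Int) (out : Int) : Decidable (Spec_solution nums k out) := by unfold Spec_solution; infer_instance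

-- ===== CLAIM (what is proved, stated in full; the proofs are below) =====
def Claim_equal_solution : Prop := ∀ (nums : List Int) (k : Int), Dom_solution nums k → Spec_solution nums k (solution nums k)

-- ===== LEMMAS AND PROOFS =====

-- A's inner fold over j ∈ [j₀, n), seen from the window already consumed:
-- with mid = (nums.drop a).take (j₀ - a) the elements nums[a:j₀], both sides
-- compute the same extension of the window, A by re-slicing, B incrementally.
theorem inner_eq (nums : List Int) (k : Int) (a : Nat) (j : Nat)
    (haj : a ≤ j) (hjn : j ≤ nums.length) (best : Int) :
    (PySem.List.pyRange (j : Int) (nums.length : Int) 1).foldl (fun max_sum jj =>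
      let subarray := PySem.List.slice nums (some (a : Int)) (some (jj + 1))
      let distinct := PySem.Set.len (PySem.Set.ofList subarray)
      if distinct ≤ k then max max_sum subarray.sum else max_sum) best
    = solutionAltInner k (nums.drop j) best
        (PySem.Set.ofList ((nums.drop a).take (j - a))) ((nums.drop a).take (j - a)).sum := by
  induction hn : nums.length - j generalizing j best with
  | zero =>
      have hj : j = nums.length := by omega
      subst hj
      rw [PySem.List.pyRange_one_eq_nil (le_refl _), List.drop_length]
      rfl
  | succ m ih =>
      have hjlt : j < nums.length := by omega
      rw [PySem.List.pyRange_one_cons (by exact_mod_cast hjlt)]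
      rw [List.drop_eq_getElem_cons hjlt]
      simp only [List.foldl_cons]
      -- the slice nums[a:j+1] is the previous window extended by nums[j]
      have hslice : PySem.List.slice nums (some (a : Int)) (some ((j : Int) + 1))
          = (nums.drop a).take (j - a) ++ [nums[j]] := by
        have h1 : ((j : Int) + 1) = ((j + 1 : Nat) : Int) := by push_cast; ring
        rw [h1, PySem.List.slice_natCast]
        have h2 : j + 1 - a = (j - a) + 1 := by omega
        rw [h2, List.take_add_one]
        have h3 : (nums.drop a)[j - a]? = some nums[j] := by
          rw [List.getElem?_drop]
          have : a + (j - a) = j := by omega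
          rw [this, List.getElem?_eq_getElem hjlt]
        rw [h3]
        rfl
      have hgetj : (nums.drop a)[j - a]? = some nums[j] := by
        rw [List.getElem?_drop]
        have : a + (j - a) = j := by omega
        rw [this, List.getElem?_eq_getElem hjlt]
      have hnext : ∀ b : Int,
          (PySem.List.pyRange ((j : Int) + 1) (nums.length : Int) 1).foldl (fun max_sum jj =>
            let subarray := PySem.List.slice nums (some (a : Int)) (some (jj + 1))
            let distinct := PySem.Set.len (PySem.Set.ofList subarray)
            if distinct ≤ k then max max_sum subarray.sum else max_sum) b
          = solutionAltInner k (nums.drop (j + 1)) b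
              (PySem.Set.ofList ((nums.drop a).take (j + 1 - a))) ((nums.drop a).take (j + 1 - a)).sum := by
        intro b
        have hcast : ((j : Int) + 1) = ((j + 1 : Nat) : Int) := by push_cast; ring
        rw [hcast]
        exact ih (j + 1) (by omega) (by omega) b (by omega)
      have htake : (nums.drop a).take (j + 1 - a) = (nums.drop a).take (j - a) ++ [nums[j]] := by
        have h2 : j + 1 - a = (j - a) + 1 := by omega
        rw [h2, List.take_add_one, hgetj]
        rfl
      rw [hslice, hnext, htake, PySem.Set.ofList_append_singleton]
      simp only [solutionAltInner, PySem.Set.len, List.sum_append, List.sum_cons,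
        List.sum_nil, add_zero]
      rfl

-- per-starting-index equality of the two outer-loop bodies
theorem body_eq (nums : List Int) (k : Int) (a : Nat) (ha : a ≤ nums.length) (best : Int) :
    (PySem.List.pyRange (a : Int) (nums.length : Int) 1).foldl (fun max_sum j =>
      let subarray := PySem.List.slice nums (some (a : Int)) (some (j + 1))
      let distinct := PySem.Set.len (PySem.Set.ofList subarray)
      if distinct ≤ k then max max_sum subarray.sum else max_sum) best
    = solutionAltInner k (PySem.List.slice nums (some (a : Int)) none) best PySem.Set.empty 0 := by
  rw [PySem.List.slice_from_natCast]
  have := inner_eq nums k a a (le_refl a) ha best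
  simpa using this

-- ===== VERDICT (by name: the statement is the Claim_ definition above) =====
theorem solution_spec : Claim_equal_solution := by
  intro nums k _
  unfold Spec_solution solution solution_alt
  rw [PySem.List.pyRange_zero_nat, List.foldl_map, List.foldl_map]
  apply PySem.List.foldl_congr_mem
  intro acc a hmem
  have ha : a ≤ nums.length := le_of_lt (List.mem_range.mp hmem)
  exact body_eq nums k a ha acc
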